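-- pv_equiv track=rewrite | github.com/djova/advent-of-code | 2022/python/day_08.py | visible_from_edge
-- ===== SOURCE A (Python) =====
-- def visible_from_edge(row):
--     max_height = -1
--     for x in row:
--         if x > max_height:
--             yield 1
--             max_height = x
--         else:
--             yield 0
-- ===== SOURCE B (Python) =====
-- def visible_from_edge(row):
--     # pass 1: prefix maxima (max of all elements strictly before each position, starting at -1)
--     prefix = []
--     m = -1
--     for x in row:
--         prefix.append(m)
--         if x > m:
--             m = x
--     # pass 2: an element is visible iff it strictly exceeds its prefix max
--     for x, p in zip(row, prefix):
--         yield 1 if x > p else 0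
-- ===== Notes on version B (the rewrite author's own statement) =====
-- stated objective: alternative
-- what changed: B decomposes the task into two passes: it first materialises the list of prefix maxima, then zips the row against it and yields the strict-comparison flags, instead of A's single loop carrying a running max and branching per element.
import Mathlib
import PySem

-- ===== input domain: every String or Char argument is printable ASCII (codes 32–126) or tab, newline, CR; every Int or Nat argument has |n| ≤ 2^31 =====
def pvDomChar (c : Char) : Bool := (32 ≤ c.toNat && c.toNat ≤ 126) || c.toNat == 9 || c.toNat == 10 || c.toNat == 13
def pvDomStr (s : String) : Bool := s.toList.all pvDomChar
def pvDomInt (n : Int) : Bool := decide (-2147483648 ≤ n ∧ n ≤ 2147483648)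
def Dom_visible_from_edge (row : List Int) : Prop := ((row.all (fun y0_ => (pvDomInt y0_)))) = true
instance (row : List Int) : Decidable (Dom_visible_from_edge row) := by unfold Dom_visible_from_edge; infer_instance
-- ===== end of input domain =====

-- B replaces A's single running-max loop by two passes (prefix-max list, then zip-compare); alternative decomposition, same cost.

-- ===== PORT A =====
-- A's loop: running max_height, yield 1 and update on strict increase, else yield 0.
def visibleGoA (maxHeight : Int) : List Int → List Int
  | [] => []
  | x :: xs => if x > maxHeight then 1 :: visibleGoA x xs else 0 :: visibleGoA maxHeight xs

def visible_from_edge (row : List Int) : List Int := visibleGoA (-1) row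

-- ===== PORT B =====
-- B pass 1: list of prefix maxima (max of elements strictly before each position, starting at -1).
def prefixMaxes (m : Int) : List Int → List Int
  | [] => []
  | x :: xs => m :: prefixMaxes (if x > m then x else m) xs

-- B pass 2: zip the row with its prefix maxima and emit the strict-comparison flags.
def visible_from_edge_alt (row : List Int) : List Int :=
  (row.zip (prefixMaxes (-1) row)).map (fun p => if p.1 > p.2 then 1 else 0)

-- ===== PRECONDITION & SPEC =====
def Spec_visible_from_edge (row : List Int) (out : List Int) : Prop := out = visible_from_edge_alt row
instance (row : List Int) (out : List Int) : Decidable (Spec_visible_from_edge row out) := by unfold Spec_visible_from_edge; infer_instance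

-- ===== CLAIM (what is proved, stated in full; the proofs are below) =====
def Claim_equal_visible_from_edge : Prop := ∀ (row : List Int), Dom_visible_from_edge row → Spec_visible_from_edge row (visible_from_edge row)

-- ===== LEMMAS AND PROOFS =====
theorem visibleGoA_eq_zip (xs : List Int) : ∀ (m : Int),
    visibleGoA m xs = (xs.zip (prefixMaxes m xs)).map (fun p => if p.1 > p.2 then 1 else 0) := by
  induction xs with
  | nil => intro m; rfl
  | cons x xs ih =>
    intro m
    simp only [visibleGoA, prefixMaxes, List.zip_cons_cons, List.map_cons]
    by_cases h : x > m <;> simp [h, ih]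

-- ===== VERDICT (by name: the statement is the Claim_ definition above) =====
theorem visible_from_edge_spec : Claim_equal_visible_from_edge := by
  intro row _
  unfold Spec_visible_from_edge visible_from_edge visible_from_edge_alt
  exact visibleGoA_eq_zip row (-1)
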